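-- pv_equiv track=rewrite | github.com/limonadev/brain-tokyo-workshop | WANNRelease/WANN/Tesis Test/metric.py | get_info_by_gen
-- ===== SOURCE A (Python) =====
-- def get_info_by_gen(results):
--     gens = []
--     for mapped in results:
--         for i,gen_map in enumerate(mapped):
--             if len(gens) == i:
--                 gens.append([])
--             gens[i].append(gen_map)
--     return gens
-- ===== SOURCE B (Python) =====
-- def get_info_by_gen(results):
--     max_len = max((len(m) for m in results), default=0)
--     return [[m[i] for m in results if i < len(m)] for i in range(max_len)]
-- ===== Notes on version B (the rewrite author's own statement) =====
-- stated objective: simpler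
-- what changed: Replaces A's row-major incremental loop (with the len(gens)==i list-extension trick and in-place column appends) by computing the maximum row length once and building the result column-by-column with a single comprehension.
import Mathlib
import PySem

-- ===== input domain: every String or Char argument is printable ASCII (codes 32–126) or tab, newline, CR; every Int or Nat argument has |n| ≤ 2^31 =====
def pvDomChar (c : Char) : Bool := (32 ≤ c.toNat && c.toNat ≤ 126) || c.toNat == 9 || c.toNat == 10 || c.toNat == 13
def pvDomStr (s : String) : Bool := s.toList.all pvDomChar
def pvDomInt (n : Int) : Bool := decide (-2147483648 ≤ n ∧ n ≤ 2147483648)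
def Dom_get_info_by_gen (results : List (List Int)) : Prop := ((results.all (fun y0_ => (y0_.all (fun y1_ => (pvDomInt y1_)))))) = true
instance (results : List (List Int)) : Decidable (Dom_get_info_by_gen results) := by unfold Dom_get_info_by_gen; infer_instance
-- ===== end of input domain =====

-- B builds the transpose column-by-column from the max row length instead of A's
-- row-major loop with incremental column extension; objective: simpler.

-- ===== PORT A =====
-- inner loop 'for i,gen_map in enumerate(mapped)': structural recursion carrying the
-- enumerate index i (always 0 ≤ i, and i ≤ gens.length at every call, so the plain
-- Nat-indexed List.modify is exact for Python's gens[i].append(gen_map))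
def pvInnerA (gens : List (List Int)) (i : Nat) (row : List Int) : List (List Int) :=
  match row with
  | [] => gens
  | x :: xs =>
      let gens1 := if gens.length = i then gens ++ [[]] else gens
      let gens2 := gens1.modify i (fun c => c ++ [x])
      pvInnerA gens2 (i + 1) xs

def get_info_by_gen (results : List (List Int)) : List (List Int) :=
  results.foldl (fun gens mapped => pvInnerA gens 0 mapped) []

-- ===== PORT B =====
def get_info_by_gen_alt (results : List (List Int)) : List (List Int) :=
  let maxLen := (results.map List.length).foldl Nat.max 0
  (List.range maxLen).map (fun i => results.filterMap (fun m => m[i]?))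

-- ===== PRECONDITION & SPEC =====
def Spec_get_info_by_gen (results : List (List Int)) (out : List (List Int)) : Prop := out = get_info_by_gen_alt results
instance (results : List (List Int)) (out : List (List Int)) : Decidable (Spec_get_info_by_gen results out) := by unfold Spec_get_info_by_gen; infer_instance

-- ===== CLAIM (what is proved, stated in full; the proofs are below) =====
def Claim_equal_get_info_by_gen : Prop := ∀ (results : List (List Int)), Dom_get_info_by_gen results → Spec_get_info_by_gen results (get_info_by_gen results)

-- ===== LEMMAS AND PROOFS =====

-- one row merged into the columns accumulated so far
def pvMix : List (List Int) → List Int → List (List Int)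
  | gs, [] => gs
  | [], x :: xs => [x] :: pvMix [] xs
  | g :: gs, x :: xs => (g ++ [x]) :: pvMix gs xs

theorem pvMix_nil_right (gs : List (List Int)) : pvMix gs [] = gs := by
  cases gs <;> rfl

theorem pvModify_append_last (l : List (List Int)) (a : List Int) (f : List Int → List Int) :
    (l ++ [a]).modify l.length f = l ++ [f a] := by
  induction l with
  | nil => rfl
  | cons h t ih => simp only [List.length_cons, List.cons_append, List.modify_succ_cons, ih]

theorem pvTake_append_cons (l1 : List (List Int)) (y : List Int) (l2 : List (List Int)) :
    (l1 ++ y :: l2).take (l1.length + 1) = l1 ++ [y] := by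
  induction l1 with
  | nil => rfl
  | cons h t ih => simp [List.take_succ_cons, ih]

theorem pvDrop_append_cons (l1 : List (List Int)) (y : List Int) (l2 : List (List Int)) :
    (l1 ++ y :: l2).drop (l1.length + 1) = l2 := by
  induction l1 with
  | nil => rfl
  | cons h t ih => simp [ih]

theorem pvInnerA_eq (row : List Int) (gens : List (List Int)) (i : Nat)
    (h : i ≤ gens.length) :
    pvInnerA gens i row = gens.take i ++ pvMix (gens.drop i) row := by
  induction row generalizing gens i with
  | nil => simp [pvInnerA, pvMix_nil_right]
  | cons x xs ih =>
    rcases Nat.lt_or_eq_of_le h with hlt | heq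
    · -- i < gens.length : no extension, modify in place
      have hne : ¬ gens.length = i := by omega
      have hmod : gens.modify i (fun c => c ++ [x])
          = gens.take i ++ (gens[i] ++ [x]) :: gens.drop (i + 1) :=
        List.modify_eq_take_cons_drop hlt
      have hlentake : (gens.take i).length = i := by simp; omega
      rw [pvInnerA]
      simp only [hne, if_false]
      rw [ih _ (i + 1) (by simp [List.length_modify]; omega), hmod]
      have ht := pvTake_append_cons (gens.take i) (gens[i] ++ [x]) (gens.drop (i + 1))
      have hd := pvDrop_append_cons (gens.take i) (gens[i] ++ [x]) (gens.drop (i + 1))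
      rw [hlentake] at ht hd
      rw [ht, hd, List.drop_eq_getElem_cons hlt, pvMix]
      simp
    · -- i = gens.length : extend with a fresh column
      have heqb : gens.length = i := heq.symm
      rw [pvInnerA]
      simp only [heqb, if_true]
      have hmod : (gens ++ [[]]).modify i (fun c => c ++ [x]) = gens ++ [[x]] := by
        rw [← heqb]
        exact pvModify_append_last gens [] (fun c => c ++ [x])
      rw [hmod, ih (gens ++ [[x]]) (i + 1) (by simp; omega)]
      have hdrop : gens.drop i = [] := List.drop_of_length_le (by omega)
      have htk : (gens ++ [[x]]).take (i + 1) = gens ++ [[x]] :=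
        List.take_of_length_le (by simp; omega)
      have hdr : (gens ++ [[x]]).drop (i + 1) = [] :=
        List.drop_of_length_le (by simp; omega)
      rw [htk, hdr, hdrop, pvMix]
      have htg : gens.take i = gens := List.take_of_length_le (by omega)
      simp [htg]

-- the column-wise characterisation of pvMix
theorem pvMix_char (r : List Int) (gs : List (List Int)) :
    pvMix gs r = (List.range (Nat.max gs.length r.length)).map
      (fun i => (gs[i]?.getD []) ++ (r[i]?.elim [] (fun x => [x]))) := by
  induction r generalizing gs with
  | nil =>
    rw [pvMix_nil_right]
    simp only [List.length_nil, Nat.max_zero]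
    apply List.ext_getElem
    · simp
    · intro j hj hj'; simp [List.getElem?_eq_getElem hj]
  | cons x xs ih =>
    cases gs with
    | nil =>
      rw [pvMix, ih []]
      simp only [List.length_nil, Nat.zero_max, List.length_cons]
      rw [List.range_succ_eq_map, List.map_cons, List.map_map]
      simp [Function.comp_def, Nat.succ_eq_add_one]
    | cons g gst =>
      rw [pvMix, ih gst]
      simp only [List.length_cons]
      have : Nat.max (gst.length + 1) (xs.length + 1) = Nat.max gst.length xs.length + 1 := by
        exact Nat.succ_max_succ gst.length xs.length
      rw [this, List.range_succ_eq_map, List.map_cons, List.map_map]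
      simp [Function.comp_def, Nat.succ_eq_add_one]

-- max row length bounds every row
theorem pvFoldlMax_le (l : List Nat) (a : Nat) : a ≤ l.foldl Nat.max a := by
  induction l generalizing a with
  | nil => simp
  | cons h t ih => exact le_trans (Nat.le_max_left a h) (ih _)

theorem pvFoldlMax_mem (l : List Nat) (a x : Nat) (hx : x ∈ l) : x ≤ l.foldl Nat.max a := by
  induction l generalizing a with
  | nil => simp at hx
  | cons h t ih =>
    rcases List.mem_cons.mp hx with rfl | hx'
    · exact le_trans (Nat.le_max_right a x) (pvFoldlMax_le t _)
    · exact ih _ hx'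

theorem pvCols_step (rs : List (List Int)) (r : List Int) :
    get_info_by_gen_alt (rs ++ [r]) = pvMix (get_info_by_gen_alt rs) r := by
  rw [pvMix_char]
  have hlen : (get_info_by_gen_alt rs).length = (rs.map List.length).foldl Nat.max 0 := by
    simp [get_info_by_gen_alt]
  unfold get_info_by_gen_alt
  simp only [List.map_append, List.map_cons, List.map_nil, List.foldl_append, List.foldl_cons,
    List.foldl_nil]
  apply List.ext_getElem
  · simp
  · intro j hj hj'
    simp only [List.getElem_map, List.getElem_range]
    rw [List.filterMap_append]
    have hjlt : j < Nat.max ((rs.map List.length).foldl Nat.max 0) r.length := by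
      simpa [hlen] using hj'
    congr 1
    · -- columns of the old rows
      by_cases hjm : j < (rs.map List.length).foldl Nat.max 0
      · simp [hjm]
      · have hnil : rs.filterMap (fun m => m[j]?) = [] := by
          rw [List.filterMap_eq_nil_iff]
          intro m hm
          have : m.length ≤ (rs.map List.length).foldl Nat.max 0 :=
            pvFoldlMax_mem _ 0 _ (List.mem_map_of_mem hm)
          exact List.getElem?_eq_none (by omega)
        have hrm : (List.range ((rs.map List.length).foldl Nat.max 0))[j]? = none :=
          List.getElem?_eq_none (by simpa using Nat.le_of_not_lt hjm)
        simp [hrm, hnil]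
    · -- the new row's contribution
      cases hr : r[j]? with
      | none => simp [hr]
      | some v => simp [hr]

theorem pvAlt_foldl (rs : List (List Int)) : get_info_by_gen_alt rs = rs.foldl pvMix [] := by
  induction rs using List.reverseRecOn with
  | nil => rfl
  | append_singleton rs r ih => rw [pvCols_step, ih, List.foldl_append]; rfl

theorem pvA_foldl (rs : List (List Int)) : get_info_by_gen rs = rs.foldl pvMix [] := by
  unfold get_info_by_gen
  apply List.foldl_ext
  intro gens m _
  simpa using pvInnerA_eq m gens 0 (Nat.zero_le _)

-- ===== VERDICT (by name: the statement is the Claim_ definition above) =====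
theorem get_info_by_gen_spec : Claim_equal_get_info_by_gen := by
  intro results _
  unfold Spec_get_info_by_gen
  rw [pvA_foldl, pvAlt_foldl]
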